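-- pv_equiv track=rewrite | github.com/waveWhirlVfx/HoudiniMind | src/houdinimind/rag/kb_builder.py | _format_vex_parameter
-- ===== SOURCE A (Python) =====
-- _VEX_TYPE_PREFIXES = (
--     "matrix4",
--     "matrix3",
--     "matrix2",
--     "vector4",
--     "vector2",
--     "vector",
--     "string",
--     "float",
--     "bsdf",
--     "dict",
--     "void",
--     "int",
-- )
--
-- def _format_vex_parameter(param: str) -> str:
--     raw = str(param or "").strip()
--     if not raw or raw == "...":
--         return raw
--
--     default = ""
--     if "=" in raw:
--         raw, default_value = raw.split("=", 1)
--         default = "=" + default_value.strip()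
--
--     array_suffix = ""
--     while raw.endswith("[]"):
--         raw = raw[:-2]
--         array_suffix += "[]"
--
--     for type_name in ("<type>", *_VEX_TYPE_PREFIXES):
--         if raw == type_name:
--             return type_name + array_suffix + default
--         if raw.startswith(type_name) and len(raw) > len(type_name):
--             return f"{type_name}{array_suffix} {raw[len(type_name) :]}{default}"
--     return raw + array_suffix + default
-- ===== SOURCE B (Python) =====
-- # B: longest-prefix match via fixed-length set lookups (lengths 7..3) instead of
-- # A's priority-ordered token scan; '=' split via find/slice; recursive '[]' stripper.
-- _VEX_TOKENS = frozenset((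
--     "<type>", "bsdf", "dict", "float", "int", "matrix2", "matrix3",
--     "matrix4", "string", "vector", "vector2", "vector4", "void",
-- ))
--
-- def _split_array_suffix(body):
--     if body.endswith("[]"):
--         inner, suffix = _split_array_suffix(body[:-2])
--         return inner, suffix + "[]"
--     return body, ""
--
-- def _format_vex_parameter(param: str) -> str:
--     raw = str(param or "").strip()
--     if not raw or raw == "...":
--         return raw
--
--     i = raw.find("=")
--     if i >= 0:
--         default = "=" + raw[i + 1:].strip()
--         raw = raw[:i]
--     else:
--         default = ""
--
--     raw, array_suffix = _split_array_suffix(raw)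
--
--     token = None
--     for L in (7, 6, 5, 4, 3):
--         if L <= len(raw) and raw[:L] in _VEX_TOKENS:
--             token = raw[:L]
--             break
--     if token is None:
--         return raw + array_suffix + default
--     rest = raw[len(token):]
--     if not rest:
--         return token + array_suffix + default
--     return token + array_suffix + " " + rest + default
-- ===== Notes on version B (the rewrite author's own statement) =====
-- stated objective: alternative
-- what changed: A's priority-ordered scan over 13 tokens (exact-match and prefix branches per token) becomes a longest-first probe of the five possible token lengths with a set-membership test on the fixed-length prefix; A's maxsplit split at the first separator becomes a find/slice split, and A's while-loop array-suffix stripper becomes a recursive helper; the proof shows first-match-in-priority-order equals longest-length match.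
import Mathlib
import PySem

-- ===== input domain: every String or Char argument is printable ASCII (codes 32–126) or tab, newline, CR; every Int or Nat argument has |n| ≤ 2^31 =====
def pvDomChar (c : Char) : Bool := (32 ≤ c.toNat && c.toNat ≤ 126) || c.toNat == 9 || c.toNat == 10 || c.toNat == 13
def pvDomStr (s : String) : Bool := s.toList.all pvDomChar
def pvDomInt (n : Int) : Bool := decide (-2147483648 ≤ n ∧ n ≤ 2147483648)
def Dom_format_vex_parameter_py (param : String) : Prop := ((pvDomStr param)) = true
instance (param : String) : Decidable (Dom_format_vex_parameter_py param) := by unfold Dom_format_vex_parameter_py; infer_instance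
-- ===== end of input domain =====

-- B replaces A's priority-ordered prefix scan by fixed-length set lookups (lengths 7..3,
-- longest wins), the default-value split at the first separator by a find/slice split, and
-- the array-suffix while-loop stripper by a recursive helper; same return value (alternative decomposition).

-- ===== PORT A =====
-- the 12 entries of _VEX_TYPE_PREFIXES, in Source A's priority order
def pvVexTypePrefixes : List (List Char) :=
  ["matrix4".toList, "matrix3".toList, "matrix2".toList, "vector4".toList,
   "vector2".toList, "vector".toList, "string".toList, "float".toList,
   "bsdf".toList, "dict".toList, "void".toList, "int".toList]

-- Source A's `while raw.endswith("[]"): raw = raw[:-2]; array_suffix += "[]"` loop;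
-- fuel = raw.length bounds the iteration count (each pass removes two characters).
def pvStripArray : Nat → List Char → List Char → List Char × List Char
  | 0, raw, suf => (raw, suf)
  | f + 1, raw, suf =>
    if PySem.Chars.endswith raw ['[', ']'] then
      pvStripArray f (PySem.Chars.slice raw none (some (-2))) (suf ++ ['[', ']'])
    else (raw, suf)

-- Source A's `if "=" in raw: raw, default_value = raw.split("=", 1); default = "=" + default_value.strip()`
-- followed by the "[]"-stripping loop; returns (raw, array_suffix, default)
def pvPrepare (raw : List Char) : List Char × List Char × List Char :=
  let rd : List Char × List Char :=
    if PySem.Chars.isIn ['='] raw then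
      match PySem.Chars.splitOnMax raw ['='] 1 with
      | r :: d :: _ => (r, '=' :: PySem.Chars.strip d)
      | _ => (raw, [])   -- unreachable: split("=",1) with "=" present yields 2 pieces
    else (raw, [])
  let rs := pvStripArray rd.1.length rd.1 []
  (rs.1, rs.2, rd.2)

-- Source A's `for type_name in ("<type>", *_VEX_TYPE_PREFIXES)` loop with its two early returns
def pvALoop (suf dflt : List Char) (raw : List Char) : List (List Char) → List Char
  | [] => raw ++ suf ++ dflt
  | t :: ts =>
    if raw = t then t ++ suf ++ dflt
    else if PySem.Chars.startswith raw t && decide (t.length < raw.length) then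
      t ++ suf ++ [' '] ++ PySem.Chars.slice raw (some (t.length : Int)) none ++ dflt
    else pvALoop suf dflt raw ts

def format_vex_parameter_py (param : String) : String :=
  let raw := PySem.Chars.strip param.toList   -- str(param or "").strip() = param.strip() for str input
  if raw = [] ∨ raw = "...".toList then String.ofList raw
  else
    let p := pvPrepare raw
    String.ofList (pvALoop p.2.1 p.2.2 p.1 ("<type>".toList :: pvVexTypePrefixes))

-- ===== PORT B =====
-- Source B's _VEX_TOKENS (a frozenset; only membership is used, so a plain list is exact)
def pvVexTokens : List (List Char) :=
  ["<type>".toList, "bsdf".toList, "dict".toList, "float".toList, "int".toList,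
   "matrix2".toList, "matrix3".toList, "matrix4".toList, "string".toList,
   "vector".toList, "vector2".toList, "vector4".toList, "void".toList]

-- Source B's recursive helper _split_array_suffix
def pvSplitArr (body : List Char) : List Char × List Char :=
  if _h : PySem.Chars.endswith body ['[', ']'] = true then
    let p := pvSplitArr (PySem.Chars.slice body none (some (-2)))
    (p.1, p.2 ++ ['[', ']'])
  else (body, [])
termination_by body.length
decreasing_by
  have h2 : 2 ≤ body.length := by
    have := List.IsSuffix.length_le ((PySem.Chars.endswith_iff body ['[', ']']).1 _h)
    simpa using this
  rw [PySem.Chars.slice_eq_listSlice, PySem.List.slice_to_neg_ofNat body 2 (by omega)]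
  simp [List.length_take]
  omega

-- Source B's `for L in (7, 6, 5, 4, 3): if L <= len(raw) and raw[:L] in _VEX_TOKENS: …` loop
def pvFindTok (body : List Char) : List Nat → Option (List Char)
  | [] => none
  | L :: Ls =>
    if L ≤ body.length ∧ body.take L ∈ pvVexTokens then some (body.take L)
    else pvFindTok body Ls

def format_vex_parameter_py_alt (param : String) : String :=
  let raw := PySem.Chars.strip param.toList
  if raw = [] ∨ raw = "...".toList then String.ofList raw
  else
    let i := PySem.Chars.find raw ['=']
    let rd : List Char × List Char :=
      if 0 ≤ i then
        (PySem.Chars.slice raw none (some i),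
         '=' :: PySem.Chars.strip (PySem.Chars.slice raw (some (i + 1)) none))
      else (raw, [])
    let p := pvSplitArr rd.1
    match pvFindTok p.1 [7, 6, 5, 4, 3] with
    | none => String.ofList (p.1 ++ p.2 ++ rd.2)
    | some token =>
      let rest := PySem.Chars.slice p.1 (some (token.length : Int)) none
      if rest = [] then String.ofList (token ++ p.2 ++ rd.2)
      else String.ofList (token ++ p.2 ++ [' '] ++ rest ++ rd.2)

-- ===== PRECONDITION & SPEC =====
def Spec_format_vex_parameter_py (param : String) (out : String) : Prop := out = format_vex_parameter_py_alt param
instance (param : String) (out : String) : Decidable (Spec_format_vex_parameter_py param out) := by unfold Spec_format_vex_parameter_py; infer_instance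

-- ===== CLAIM =====
def Claim_equal_format_vex_parameter_py : Prop := ∀ (param : String), Dom_format_vex_parameter_py param → Spec_format_vex_parameter_py param (format_vex_parameter_py param)

-- ===== LEMMAS AND PROOFS =====

-- the common rendering both matchers reduce to: chosen token t (or none)
def pvRender (suf dflt raw : List Char) : Option (List Char) → List Char
  | none => raw ++ suf ++ dflt
  | some t =>
    if raw = t then t ++ suf ++ dflt
    else t ++ suf ++ [' '] ++ PySem.Chars.slice raw (some (t.length : Int)) none ++ dflt

lemma sw_iff (raw t : List Char) :
    PySem.Chars.startswith raw t = true ↔ t <+: raw := PySem.Chars.startswith_iff raw t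

-- A's loop is find?-then-render
lemma aLoop_eq_render (suf dflt raw : List Char) : ∀ ts : List (List Char),
    pvALoop suf dflt raw ts
      = pvRender suf dflt raw (ts.find? (fun t => PySem.Chars.startswith raw t)) := by
  intro ts
  induction ts with
  | nil => rfl
  | cons t ts ih =>
    by_cases he : raw = t
    · have hsw : PySem.Chars.startswith raw t = true := (sw_iff raw t).2 (he ▸ List.prefix_refl t)
      rw [List.find?_cons_of_pos hsw]
      simp [pvALoop, he, pvRender]
    · by_cases hsw : PySem.Chars.startswith raw t = true
      · have hpre : t <+: raw := (sw_iff raw t).1 hsw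
        have hlt : t.length < raw.length := by
          rcases Nat.lt_or_ge t.length raw.length with h | h
          · exact h
          · exact absurd (List.IsPrefix.eq_of_length hpre
              (Nat.le_antisymm hpre.length_le h)).symm he
        rw [List.find?_cons_of_pos hsw]
        simp [pvALoop, he, hsw, hlt, pvRender]
      · have hsw' : PySem.Chars.startswith raw t = false := by simpa using hsw
        have hfind : List.find? (fun u => PySem.Chars.startswith raw u) (t :: ts)
            = List.find? (fun u => PySem.Chars.startswith raw u) ts :=
          List.find?_cons_of_neg (by simp [hsw'])
        rw [hfind]
        simp [pvALoop, he, hsw', ih]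

-- ---- token-choice equality: A's first match in priority order = B's longest match ----

lemma perm_toks : pvVexTokens.Perm ("<type>".toList :: pvVexTypePrefixes) := by decide

-- every token's length is one of B's probe lengths
lemma tok_lens : ∀ t ∈ pvVexTokens, t.length ∈ [7, 6, 5, 4, 3] := by decide

-- comparable distinct tokens have different lengths
lemma toks_len_inj : ∀ a ∈ pvVexTokens, ∀ b ∈ pvVexTokens,
    (a <+: b ∨ b <+: a) → a.length = b.length → a = b := by decide

-- in A's priority order, a later simultaneously-matching token is strictly shorter
lemma aToks_pairwise :
    ("<type>".toList :: pvVexTypePrefixes).Pairwise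
      (fun a b => (a <+: b ∨ b <+: a) → b.length < a.length) := by decide

-- first match = longest match, given the strict pairwise ordering
lemma max?_filter_eq_find? (raw : List Char) : ∀ ts : List (List Char),
    ts.Pairwise (fun a b => (a <+: raw) → (b <+: raw) → b.length < a.length) →
    PySem.List.max? (ts.filter (fun t => PySem.Chars.startswith raw t)) (fun t => t.length)
      = ts.find? (fun t => PySem.Chars.startswith raw t) := by
  intro ts
  induction ts with
  | nil => intro _; rfl
  | cons t ts ih =>
    intro hp
    rcases List.pairwise_cons.1 hp with ⟨h1, h2⟩
    by_cases hsw : PySem.Chars.startswith raw t = true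
    · rw [List.find?_cons_of_pos hsw, List.filter_cons_of_pos hsw]
      rcases hmax : PySem.List.max? (t :: ts.filter (fun t => PySem.Chars.startswith raw t))
          (fun t => t.length) with _ | m
      · exact absurd ((PySem.List.max?_eq_none_iff _ _).1 hmax) (by simp)
      · have hmem := PySem.List.max?_mem hmax
        have hmaxt := PySem.List.max?_isMax hmax t (by simp)
        rcases List.mem_cons.1 hmem with h | h
        · simp [h]
        · have hmf := List.mem_filter.1 h
          have hlt : m.length < t.length :=
            h1 m hmf.1 ((sw_iff raw t).1 hsw) ((sw_iff raw m).1 hmf.2)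
          omega
    · have hsw' : PySem.Chars.startswith raw t = false := by simpa using hsw
      rw [List.find?_cons_of_neg (by simp [hsw']), List.filter_cons_of_neg (by simp [hsw'])]
      exact ih h2

-- if pvFindTok finds nothing, no probed length admits a token prefix
lemma findTok_none (body : List Char) : ∀ Ls, pvFindTok body Ls = none →
    ∀ L ∈ Ls, ¬ (L ≤ body.length ∧ body.take L ∈ pvVexTokens) := by
  intro Ls
  induction Ls with
  | nil => intro _ L hL; cases hL
  | cons L Ls ih =>
    intro h L' hL'
    by_cases hc : L ≤ body.length ∧ body.take L ∈ pvVexTokens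
    · simp [pvFindTok, hc] at h
    · have h' : pvFindTok body Ls = none := by simpa [pvFindTok, hc] using h
      rcases List.mem_cons.1 hL' with rfl | hmem
      · exact hc
      · exact ih h' L' hmem

-- if pvFindTok finds t on a descending length list, t is a token prefix of body,
-- maximal among token prefixes whose length is probed
lemma findTok_some (body t : List Char) : ∀ Ls, Ls.Pairwise (fun a b => b ≤ a) →
    pvFindTok body Ls = some t →
    t ∈ pvVexTokens ∧ t <+: body ∧
      ∀ u ∈ pvVexTokens, u <+: body → u.length ∈ Ls → u.length ≤ t.length := by
  intro Ls
  induction Ls with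
  | nil => intro _ h; cases h
  | cons L Ls ih =>
    intro hp h
    rcases List.pairwise_cons.1 hp with ⟨h1, h2⟩
    by_cases hc : L ≤ body.length ∧ body.take L ∈ pvVexTokens
    · have ht : t = body.take L := by simpa [pvFindTok, hc] using h.symm
      have hlen : t.length = L := by
        rw [ht, List.length_take]; omega
      refine ⟨ht ▸ hc.2, ht ▸ List.take_prefix L body, ?_⟩
      intro u _ _ hu
      rcases List.mem_cons.1 hu with rfl | hmem
      · omega
      · have := h1 u.length hmem; omega
    · have h' : pvFindTok body Ls = some t := by simpa [pvFindTok, hc] using h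
      obtain ⟨hmemt, hpre, hmax⟩ := ih h2 h'
      refine ⟨hmemt, hpre, ?_⟩
      intro u hmemu hpreu hu
      rcases List.mem_cons.1 hu with hL | hmem
      · exfalso
        apply hc
        refine ⟨hL ▸ hpreu.length_le, ?_⟩
        have : body.take u.length = u := (List.prefix_iff_eq_take.1 hpreu).symm
        rw [← hL]; rw [this]; exact hmemu
      · exact hmax u hmemu hpreu hmem

-- B's length-descending probe equals the max over the matching tokens
lemma findTok_eq_max? (body : List Char) :
    pvFindTok body [7, 6, 5, 4, 3]
      = PySem.List.max? ((("<type>".toList :: pvVexTypePrefixes)).filter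
          (fun t => PySem.Chars.startswith body t)) (fun t => t.length) := by
  rcases hF : pvFindTok body [7, 6, 5, 4, 3] with _ | t
  · have hnone := findTok_none body _ hF
    have hfil : (("<type>".toList :: pvVexTypePrefixes)).filter
        (fun t => PySem.Chars.startswith body t) = [] := by
      rw [List.filter_eq_nil_iff]
      intro u hu hsw
      have hpre : u <+: body := (sw_iff body u).1 hsw
      have humem : u ∈ pvVexTokens := perm_toks.mem_iff.2 hu
      exact hnone u.length (tok_lens u humem)
        ⟨hpre.length_le, (List.prefix_iff_eq_take.1 hpre) ▸ humem⟩
    rw [hfil]; rfl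
  · obtain ⟨hmemt, hpre, hmax⟩ := findTok_some body t _ (by decide) hF
    rcases hM : PySem.List.max? ((("<type>".toList :: pvVexTypePrefixes)).filter
        (fun t => PySem.Chars.startswith body t)) (fun t => t.length) with _ | m
    · exfalso
      have hfil := (PySem.List.max?_eq_none_iff _ _).1 hM
      have : t ∈ (("<type>".toList :: pvVexTypePrefixes)).filter
          (fun t => PySem.Chars.startswith body t) :=
        List.mem_filter.2 ⟨perm_toks.mem_iff.1 hmemt, (sw_iff body t).2 hpre⟩
      rw [hfil] at this; exact absurd this (List.not_mem_nil)
    · have hmemm := PySem.List.max?_mem hM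
      have hmf := List.mem_filter.1 hmemm
      have hmemm' : m ∈ pvVexTokens := perm_toks.mem_iff.2 hmf.1
      have hprem : m <+: body := (sw_iff body m).1 hmf.2
      have h1 : t.length ≤ m.length :=
        PySem.List.max?_isMax hM t
          (List.mem_filter.2 ⟨perm_toks.mem_iff.1 hmemt, (sw_iff body t).2 hpre⟩)
      have h2 : m.length ≤ t.length := hmax m hmemm' hprem (tok_lens m hmemm')
      have : t = m := toks_len_inj t hmemt m hmemm'
        (List.prefix_or_prefix_of_prefix hpre hprem) (by omega)
      simp [this]

-- B's post-match rendering is pvRender of its chosen token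
lemma bMatch_eq_render (body suf dflt : List Char) :
    (match pvFindTok body [7, 6, 5, 4, 3] with
      | none => body ++ suf ++ dflt
      | some token =>
        let rest := PySem.Chars.slice body (some (token.length : Int)) none
        if rest = [] then token ++ suf ++ dflt
        else token ++ suf ++ [' '] ++ rest ++ dflt)
      = pvRender suf dflt body (("<type>".toList :: pvVexTypePrefixes).find?
          (fun t => PySem.Chars.startswith body t)) := by
  rw [← max?_filter_eq_find? body _
    (aToks_pairwise.imp (fun h ha hb => h (List.prefix_or_prefix_of_prefix ha hb))),
    ← findTok_eq_max?]
  rcases hF : pvFindTok body [7, 6, 5, 4, 3] with _ | t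
  · rfl
  · obtain ⟨_, hpre, _⟩ := findTok_some body t _ (by decide) hF
    have hdrop : PySem.Chars.slice body (some (t.length : Int)) none = body.drop t.length := by
      simp [PySem.Chars.slice_eq_listSlice, PySem.List.slice_from_natCast]
    by_cases he : body = t
    · have : body.drop t.length = [] := by simp [he]
      simp [pvRender, he]
    · have hne : body.drop t.length ≠ [] := by
        intro h0
        have hle : body.length ≤ t.length := by
          have := List.drop_eq_nil_iff.1 h0; omega
        exact he (List.IsPrefix.eq_of_length hpre (Nat.le_antisymm hpre.length_le hle)).symm
      simp [pvRender, he, hne]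

-- ---- '=' split equality ----

-- splitOnMax.go with maxsplit 0 returns the remainder as one last piece (any fuel)
lemma sogo_zero (sep : List Char) : ∀ (fuel : Nat) (l cur : List Char) (acc : List (List Char)),
    PySem.Chars.splitOnMax.go sep fuel 0 l cur acc
      = ((cur.reverse ++ l) :: acc).reverse := by
  intro fuel l cur acc
  cases fuel with
  | zero => simp [PySem.Chars.splitOnMax.go]
  | succ f =>
    cases l with
    | nil => simp [PySem.Chars.splitOnMax.go]
    | cons c rest => simp [PySem.Chars.splitOnMax.go]

-- splitOnMax.go with maxsplit 1 splits at the first '=' (when '=' occurs)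
lemma sogo_one : ∀ (l : List Char), '=' ∈ l → ∀ (fuel : Nat), l.length < fuel →
    ∀ (cur : List Char) (acc : List (List Char)),
    PySem.Chars.splitOnMax.go ['='] fuel 1 l cur acc
      = acc.reverse ++ [cur.reverse ++ l.takeWhile (fun x => !(x == '=')),
         (l.dropWhile (fun x => !(x == '='))).tail] := by
  intro l
  induction l with
  | nil => intro h; cases h
  | cons c rest ih =>
    intro hmem fuel hfuel cur acc
    obtain ⟨f, rfl⟩ : ∃ f, fuel = f + 1 := ⟨fuel - 1, by omega⟩
    by_cases hc : c = '='
    · subst hc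
      rw [PySem.Chars.splitOnMax.go]
      simp only [List.isPrefixOf, BEq.rfl, Bool.and_true]
      rw [if_neg (by omega)]
      simp only [if_true]
      rw [sogo_zero]
      simp [List.takeWhile, List.dropWhile]
    · have hmem' : '=' ∈ rest := by
        rcases List.mem_cons.1 hmem with h | h
        · exact absurd h.symm hc
        · exact h
      rw [PySem.Chars.splitOnMax.go]
      have hpre : (['='].isPrefixOf (c :: rest)) = false := by
        simp [List.isPrefixOf]; exact fun h => absurd h.symm hc
      rw [if_neg (by omega)]
      simp only [hpre, Bool.false_eq_true, if_false]
      rw [ih hmem' f (by simp at hfuel ⊢; omega) (c :: cur) acc]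
      have hb : (!(c == '=')) = true := by simp [hc]
      simp [List.takeWhile, List.dropWhile, hb]

-- s.split("=", 1) with '=' present = (part before the first '=', part after it)
lemma splitOnMax_eq (raw : List Char) (h : '=' ∈ raw) :
    PySem.Chars.splitOnMax raw ['='] 1
      = [raw.takeWhile (fun x => !(x == '=')),
         (raw.dropWhile (fun x => !(x == '='))).tail] := by
  rw [PySem.Chars.splitOnMax]
  rw [if_neg (by omega)]
  have : (1 : Int).toNat = 1 := rfl
  rw [this, sogo_one raw h (raw.length + 1) (by omega) [] []]
  simp

-- find.go on a single-character needle scans to the first occurrence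
lemma find_go_char (c : Char) : ∀ (l : List Char) (k : Nat),
    PySem.Chars.find.go [c] l k
      = if c ∈ l then ((k + (l.takeWhile (fun x => !(x == c))).length : Nat) : Int) else -1 := by
  intro l
  induction l with
  | nil => intro k; simp [PySem.Chars.find.go]
  | cons d rest ih =>
    intro k
    by_cases hd : d = c
    · subst hd
      simp [PySem.Chars.find.go, List.isPrefixOf, List.takeWhile]
    · have hne : ([c].isPrefixOf (d :: rest)) = false := by
        simp [List.isPrefixOf]; exact fun h => absurd h.symm hd
      rw [PySem.Chars.find.go]
      simp only [hne, Bool.false_eq_true, if_false]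
      rw [ih (k + 1)]
      have hb : (!(d == c)) = true := by simp [hd]
      by_cases hm : c ∈ rest
      · have hm' : c ∈ d :: rest := List.mem_cons_of_mem d hm
        simp only [hm, hm', if_true, List.takeWhile, hb]
        push_cast
        simp [List.length_cons]
        ring
      · have hm' : c ∉ d :: rest := by
          intro h; rcases List.mem_cons.1 h with h | h
          · exact hd h.symm
          · exact hm h
        simp [hm, hm']

-- s.find("=") = length of the prefix before the first '=' (or -1)
lemma find_eq_char (raw : List Char) :
    PySem.Chars.find raw ['=']
      = if '=' ∈ raw then (((raw.takeWhile (fun x => !(x == '='))).length : Nat) : Int)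
        else -1 := by
  rw [PySem.Chars.find, find_go_char]
  split <;> simp

-- '=' in s ↔ the membership test
lemma isIn_eq_char (raw : List Char) :
    PySem.Chars.isIn ['='] raw = decide ('=' ∈ raw) := by
  rw [PySem.Chars.isIn, find_eq_char]
  by_cases h : '=' ∈ raw <;> simp [h]

-- the two '='-splitting decompositions agree
lemma prep_rd_eq (raw : List Char) :
    (if PySem.Chars.isIn ['='] raw then
      match PySem.Chars.splitOnMax raw ['='] 1 with
      | r :: d :: _ => (r, '=' :: PySem.Chars.strip d)
      | _ => (raw, ([] : List Char))
     else (raw, []))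
    = (if 0 ≤ PySem.Chars.find raw ['='] then
        (PySem.Chars.slice raw none (some (PySem.Chars.find raw ['='])),
         '=' :: PySem.Chars.strip
           (PySem.Chars.slice raw (some (PySem.Chars.find raw ['='] + 1)) none))
       else (raw, [])) := by
  by_cases h : '=' ∈ raw
  · rw [isIn_eq_char, find_eq_char, splitOnMax_eq raw h]
    simp only [h, decide_true, if_true]
    rw [if_pos (by positivity)]
    have htw : raw.takeWhile (fun x => !(x == '=')) <+: raw := List.takeWhile_prefix _
    have hslice1 : PySem.Chars.slice raw none
        (some ((raw.takeWhile (fun x => !(x == '='))).length : Int))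
        = raw.takeWhile (fun x => !(x == '=')) := by
      rw [PySem.Chars.slice_eq_listSlice, PySem.List.slice_to_natCast]
      exact (List.prefix_iff_eq_take.1 htw).symm
    have hslice2 : PySem.Chars.slice raw
        (some (((raw.takeWhile (fun x => !(x == '='))).length : Int) + 1)) none
        = (raw.dropWhile (fun x => !(x == '='))).tail := by
      rw [PySem.Chars.slice_eq_listSlice]
      have hcast : (((raw.takeWhile (fun x => !(x == '='))).length : Int) + 1)
          = (((raw.takeWhile (fun x => !(x == '='))).length + 1 : Nat) : Int) := by push_cast; ring
      rw [hcast, PySem.List.slice_from_natCast]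
      have hsplit := List.takeWhile_append_dropWhile (p := fun x => !(x == '=')) (l := raw)
      generalize hTW : List.takeWhile (fun x => !(x == '=')) raw = tw at *
      generalize hDW : List.dropWhile (fun x => !(x == '=')) raw = dw at *
      rw [← hsplit, List.drop_append]
      simp [List.drop_eq_nil_of_le, List.drop_one]
    rw [hslice1, hslice2]
  · rw [isIn_eq_char, find_eq_char]
    simp [h]

-- ---- "[]"-stripping equality ----

-- the suffix pvSplitArr builds is a run of "[]" pairs, so "[]" commutes past it
lemma splitArr_suffix_comm (body : List Char) :
    (pvSplitArr body).2 ++ ['[', ']'] = '[' :: ']' :: (pvSplitArr body).2 := by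
  induction body using pvSplitArr.induct with
  | case1 body h ih =>
    rw [pvSplitArr, dif_pos h]
    simp only []
    simp only [PySem.Chars.slice_eq_listSlice] at ih ⊢
    rw [ih]
    simp [ih]
  | case2 body h =>
    rw [pvSplitArr, dif_neg h]
    simp

-- A's fuelled while-loop equals B's recursion (fuel ≥ |body| suffices: 2 chars go per pass)
lemma stripArray_eq_splitArr : ∀ (fuel : Nat) (body suf : List Char), body.length ≤ fuel →
    pvStripArray fuel body suf = ((pvSplitArr body).1, suf ++ (pvSplitArr body).2) := by
  intro fuel
  induction fuel with
  | zero =>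
    intro body suf hlen
    have : body = [] := List.eq_nil_of_length_eq_zero (by omega)
    subst this
    rw [pvSplitArr]
    simp [pvStripArray, PySem.Chars.endswith, List.isSuffixOf]
  | succ f ih =>
    intro body suf hlen
    by_cases h : PySem.Chars.endswith body ['[', ']'] = true
    · have h2 : 2 ≤ body.length := by
        have := List.IsSuffix.length_le ((PySem.Chars.endswith_iff body ['[', ']']).1 h)
        simpa using this
      have hsl : (PySem.Chars.slice body none (some (-2))).length = body.length - 2 := by
        rw [PySem.Chars.slice_eq_listSlice, PySem.List.slice_to_neg_ofNat body 2 (by omega)]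
        simp [List.length_take]
      rw [pvStripArray, if_pos h, ih _ _ (by omega)]
      conv_rhs => rw [pvSplitArr]
      rw [dif_pos h]
      simp only [List.append_assoc]
      rw [splitArr_suffix_comm]
      simp
    · rw [pvStripArray, if_neg h, pvSplitArr, dif_neg h]
      simp

-- ===== VERDICT =====
theorem format_vex_parameter_py_spec : Claim_equal_format_vex_parameter_py := by
  intro param _
  unfold Spec_format_vex_parameter_py
  simp only [format_vex_parameter_py, format_vex_parameter_py_alt]
  by_cases h : PySem.Chars.strip param.toList = [] ∨ PySem.Chars.strip param.toList = "...".toList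
  · rw [if_pos h, if_pos h]
  · rw [if_neg h, if_neg h]
    rw [pvPrepare]
    simp only []
    rw [prep_rd_eq]
    set rd := (if 0 ≤ PySem.Chars.find (PySem.Chars.strip param.toList) ['='] then
        (PySem.Chars.slice (PySem.Chars.strip param.toList) none
           (some (PySem.Chars.find (PySem.Chars.strip param.toList) ['='])),
         '=' :: PySem.Chars.strip (PySem.Chars.slice (PySem.Chars.strip param.toList)
           (some (PySem.Chars.find (PySem.Chars.strip param.toList) ['='] + 1)) none))
      else (PySem.Chars.strip param.toList, [])) with hrd
    rw [stripArray_eq_splitArr rd.1.length rd.1 [] (le_refl _)]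
    rw [aLoop_eq_render]
    rw [← bMatch_eq_render]
    rcases hF : pvFindTok (pvSplitArr rd.1).1 [7, 6, 5, 4, 3] with _ | t
    · simp
    · by_cases hr : PySem.Chars.slice (pvSplitArr rd.1).1 (some (t.length : Int)) none = []
      · simp
        try (split <;> simp)
      · simp
        try (split <;> simp)
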